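-- pv_equiv track=rewrite | github.com/amorilla42/Forensic-Tool-using-curses | src/curses_ui/system_artifacts_viewer.py | fmt_usb_devices
-- ===== SOURCE A (Python) =====
-- def _recortar(texto, ancho):
--     s = "" if texto is None else str(texto).replace("\n", " ")
--     return s if len(s) <= ancho else s[:ancho-1] + "…"
--
-- def fmt_usb_devices(rows, width):
--     # device_class, device_id, friendly_name, device_desc
--     w1 = int(width*0.20); w2 = int(width*0.24); w3 = int(width*0.24)
--     w4 = width - (w1 + w2 + w3 + 6)
--     out = []
--     head = f"{'Clase':<{w1}}│ {'ID':<{w2}}│ {'Nombre':<{w3}}│ {'Descripción':<{w4}}"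
--     out.append(head); out.append("─"*len(head))
--     for dclass, did, fname, ddesc in rows:
--         out.append(
--             f"{_recortar(dclass,w1):<{w1}}│ {_recortar(did,w2):<{w2}}│ {_recortar(fname,w3):<{w3}}│ {_recortar(ddesc,w4):<{w4}}"
--         )
--     return "\n".join(out)
-- ===== SOURCE B (Python) =====
-- def _recortar(texto, ancho):
--     s = "" if texto is None else str(texto).replace("\n", " ")
--     return s if len(s) <= ancho else s[:ancho-1] + "…"
--
-- def _pad(c, w):
--     return f"{c:<{w}}"
--
-- def _column(title, values, w):
--     # one fully padded column: title cell on top, then one cell per row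
--     return [_pad(title, w)] + [_pad(_recortar(v, w), w) for v in values]
--
-- def fmt_usb_devices(rows, width):
--     w1 = int(width*0.20); w2 = int(width*0.24); w3 = int(width*0.24)
--     w4 = width - (w1 + w2 + w3 + 6)
--     c1 = _column("Clase",       [r[0] for r in rows], w1)
--     c2 = _column("ID",          [r[1] for r in rows], w2)
--     c3 = _column("Nombre",      [r[2] for r in rows], w3)
--     c4 = _column("Descripción", [r[3] for r in rows], w4)
--     body = ["│ ".join(cells) for cells in zip(c1, c2, c3, c4)]
--     return "\n".join([body[0], "─" * len(body[0])] + body[1:])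
-- ===== Notes on version B (the rewrite author's own statement) =====
-- stated objective: alternative
-- what changed: B builds the table column-major: each of the four columns is materialised as a fully padded list of cells (title on top) in its own pass, then the columns are transposed with zip and joined per line, instead of A's single row-major pass emitting one hard-coded f-string line per row.
import Mathlib
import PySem

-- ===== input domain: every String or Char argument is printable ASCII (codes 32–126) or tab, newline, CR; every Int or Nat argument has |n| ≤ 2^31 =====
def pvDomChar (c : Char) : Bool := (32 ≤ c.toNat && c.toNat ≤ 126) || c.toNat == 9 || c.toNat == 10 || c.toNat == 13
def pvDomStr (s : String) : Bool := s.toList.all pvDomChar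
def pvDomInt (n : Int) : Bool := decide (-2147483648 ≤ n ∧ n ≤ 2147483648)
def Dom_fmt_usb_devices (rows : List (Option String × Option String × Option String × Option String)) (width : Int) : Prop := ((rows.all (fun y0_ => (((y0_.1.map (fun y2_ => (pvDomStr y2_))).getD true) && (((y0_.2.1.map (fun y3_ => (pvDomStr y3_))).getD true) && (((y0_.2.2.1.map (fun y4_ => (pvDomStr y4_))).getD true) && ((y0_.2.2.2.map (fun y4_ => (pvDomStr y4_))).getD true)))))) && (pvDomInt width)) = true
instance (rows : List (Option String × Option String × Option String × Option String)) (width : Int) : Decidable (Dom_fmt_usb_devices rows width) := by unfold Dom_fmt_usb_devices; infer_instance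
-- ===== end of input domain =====

-- B builds the table column-major (each padded column in its own pass, then transpose and join)
-- instead of A's row-major pass emitting one f-string line per row; same cost, no speed claim.

-- int(n * c) for a Python float literal c stored exactly as M / 2^E: the product n*M/2^E is rounded
-- to the nearest double (53-bit mantissa, ties to even) and then truncated toward zero.
-- Exact for |n| ≤ 2^31 (no overflow/subnormals in that range).
def pyTruncMulFloat (n M : Int) (E : Nat) : Int :=
  let p := n * M
  let a := p.natAbs
  if a = 0 then 0 else
    let L := PySem.Int.bitLength p
    let r := if L ≤ 53 then a else
      let k := L - 53
      let q := a >>> k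
      let rem := a % (1 <<< k)
      let half := 1 <<< (k - 1)
      let q' := if half < rem ∨ (rem = half ∧ q % 2 = 1) then q + 1 else q
      q' <<< k
    (if p < 0 then -1 else 1) * ((r >>> E : Nat) : Int)

-- f"{s:<{w}}" for 0 ≤ w (pad right with spaces to width w; identity when s is at least w long)
def pyLjust (s : List Char) (w : Int) : List Char :=
  s ++ List.replicate (w.toNat - s.length) ' '

-- _recortar, shared verbatim by A and B
def recortar (texto : Option String) (ancho : Int) : List Char :=
  let s := match texto with
    | none => []
    | some t => PySem.Chars.replace t.toList "\n".toList " ".toList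
  if (s.length : Int) ≤ ancho then s
  else PySem.List.slice s none (some (ancho - 1)) ++ ['…']

-- ===== PORT A =====
def fmt_usb_devices (rows : List (Option String × Option String × Option String × Option String)) (width : Int) : String :=
  let w1 := pyTruncMulFloat width 3602879701896397 54
  let w2 := pyTruncMulFloat width 1080863910568919 52
  let w3 := pyTruncMulFloat width 1080863910568919 52
  let w4 := width - (w1 + w2 + w3 + 6)
  let head := pyLjust "Clase".toList w1 ++ "│ ".toList ++ pyLjust "ID".toList w2 ++ "│ ".toList
      ++ pyLjust "Nombre".toList w3 ++ "│ ".toList ++ pyLjust "Descripción".toList w4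
  let out := [head, List.replicate head.length '─']
  let out := rows.foldl (fun acc r =>
    acc ++ [pyLjust (recortar r.1 w1) w1 ++ "│ ".toList ++ pyLjust (recortar r.2.1 w2) w2 ++ "│ ".toList
      ++ pyLjust (recortar r.2.2.1 w3) w3 ++ "│ ".toList ++ pyLjust (recortar r.2.2.2 w4) w4]) out
  String.ofList (PySem.Chars.join "\n".toList out)

-- ===== PORT B =====
-- _column: the fully padded column — title cell on top, then one cell per table row
def columnB (title : List Char) (values : List (Option String)) (w : Int) : List (List Char) :=
  pyLjust title w :: values.map (fun v => pyLjust (recortar v w) w)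

-- zip(c1, c2, c3, c4): truncating 4-way zip
def zip4 {α : Type} : List α → List α → List α → List α → List (α × α × α × α)
  | a :: as, b :: bs, c :: cs, d :: ds => (a, b, c, d) :: zip4 as bs cs ds
  | _, _, _, _ => []

def fmt_usb_devices_alt (rows : List (Option String × Option String × Option String × Option String)) (width : Int) : String :=
  let w1 := pyTruncMulFloat width 3602879701896397 54
  let w2 := pyTruncMulFloat width 1080863910568919 52
  let w3 := pyTruncMulFloat width 1080863910568919 52
  let w4 := width - (w1 + w2 + w3 + 6)
  let c1 := columnB "Clase".toList (rows.map (·.1)) w1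
  let c2 := columnB "ID".toList (rows.map (·.2.1)) w2
  let c3 := columnB "Nombre".toList (rows.map (·.2.2.1)) w3
  let c4 := columnB "Descripción".toList (rows.map (·.2.2.2)) w4
  let body := (zip4 c1 c2 c3 c4).map (fun t =>
    PySem.Chars.join "│ ".toList [t.1, t.2.1, t.2.2.1, t.2.2.2])
  -- body[0]: always exists (every column starts with its title cell), so headD's default is unreachable
  let h := body.headD []
  String.ofList (PySem.Chars.join "\n".toList ([h, List.replicate h.length '─'] ++ body.drop 1))

-- ===== PRECONDITION & SPEC =====
-- Pre_ excludes exactly the inputs on which Python A raises ValueError: a negative computed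
-- column width in a format specifier, i.e. every width except 12 and those ≥ 14 (checked exhaustively
-- below 2^31 and by the truncation bound 0.32·width − 6 > 0 above).
def Pre_fmt_usb_devices (rows : List (Option String × Option String × Option String × Option String)) (width : Int) : Prop :=
  width = 12 ∨ 14 ≤ width
instance (rows : List (Option String × Option String × Option String × Option String)) (width : Int) : Decidable (Pre_fmt_usb_devices rows width) := by unfold Pre_fmt_usb_devices; infer_instance

def pvWitness_fmt_usb_devices : (List (Option String × Option String × Option String × Option String)) × Int :=
  ([(some "HID", none, some "Mouse", some "USB Input Device")], 40)

def Spec_fmt_usb_devices (rows : List (Option String × Option String × Option String × Option String)) (width : Int) (out : String) : Prop := out = fmt_usb_devices_alt rows width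
instance (rows : List (Option String × Option String × Option String × Option String)) (width : Int) (out : String) : Decidable (Spec_fmt_usb_devices rows width out) := by unfold Spec_fmt_usb_devices; infer_instance

-- ===== CLAIM (what is proved, stated in full; the proofs are below) =====
def Claim_equal_fmt_usb_devices : Prop := ∀ (rows : List (Option String × Option String × Option String × Option String)) (width : Int), Dom_fmt_usb_devices rows width → Pre_fmt_usb_devices rows width → Spec_fmt_usb_devices rows width (fmt_usb_devices rows width)

-- ===== LEMMAS AND PROOFS =====

-- zip4 of four maps over the same list is a map of the 4-tuple
theorem zip4_map {α β : Type} (l : List α) (f1 f2 f3 f4 : α → β) :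
    zip4 (l.map f1) (l.map f2) (l.map f3) (l.map f4)
      = l.map (fun x => (f1 x, f2 x, f3 x, f4 x)) := by
  induction l with
  | nil => rfl
  | cons x xs ih => simp [zip4, ih]

theorem fmt_usb_devices_eq_alt (rows : List (Option String × Option String × Option String × Option String)) (width : Int) :
    fmt_usb_devices rows width = fmt_usb_devices_alt rows width := by
  unfold fmt_usb_devices fmt_usb_devices_alt columnB
  simp only [zip4, List.map_map, Function.comp_def, zip4_map,
    PySem.List.foldl_append_singleton_eq_map,
    List.map_cons, List.headD_cons, List.drop_succ_cons, List.drop_zero]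
  simp only [PySem.Chars.join_cons_cons, PySem.Chars.join_singleton, List.append_assoc,
    List.cons_append, List.nil_append]

-- ===== VERDICT (by name: the statement is the Claim_ definition above) =====
theorem fmt_usb_devices_spec : Claim_equal_fmt_usb_devices := by
  intro rows width _ _
  unfold Spec_fmt_usb_devices
  exact fmt_usb_devices_eq_alt rows width
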